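-- pv_equiv track=rewrite | github.com/echang594/google-foobar | level-3/find-the-access-codes/solution.py | solution
-- ===== SOURCE A (Python) =====
-- def solution(l):
--     ans = 0
--     divisors = [0] * len(l)
--     for i in range(len(l)):
--         for j in range(i):
--             if l[i] % l[j] == 0:
--                 divisors[i] += 1
--                 ans += divisors[j]
--     return ans
-- ===== SOURCE B (Python) =====
-- def solution(l):
--     n = len(l)
--     ans = 0
--     for i in range(n):
--         for j in range(i + 1, n):
--             for k in range(j + 1, n):
--                 if l[j] % l[i] == 0 and l[k] % l[j] == 0:
--                     ans += 1
--     return ans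
-- ===== Notes on version B (the rewrite author's own statement) =====
-- stated objective: simpler
-- what changed: Replaces A's stateful DP over a divisors array with a direct triple-nested enumeration of index triples i<j<k, keeping only a running count.
import Mathlib
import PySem

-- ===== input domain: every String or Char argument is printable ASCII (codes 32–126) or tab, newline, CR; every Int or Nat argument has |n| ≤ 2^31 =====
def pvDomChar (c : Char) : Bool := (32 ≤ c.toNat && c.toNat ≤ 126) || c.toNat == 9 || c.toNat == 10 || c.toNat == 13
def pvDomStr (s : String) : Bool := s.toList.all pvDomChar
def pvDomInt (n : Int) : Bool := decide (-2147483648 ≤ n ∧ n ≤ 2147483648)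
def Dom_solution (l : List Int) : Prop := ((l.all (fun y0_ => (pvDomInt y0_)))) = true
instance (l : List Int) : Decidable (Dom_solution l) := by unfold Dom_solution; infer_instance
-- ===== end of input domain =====

-- B replaces A's stateful DP over a divisors array by a direct enumeration of all
-- index triples i<j<k, keeping only a running count (simpler, not faster; return value only).

-- ===== PORT A =====
def solution (l : List Int) : Int :=
  ((PySem.List.pyRange 0 (l.length : Int) 1).foldl
    (fun (st : Int × List Int) i =>
      (PySem.List.pyRange 0 i 1).foldl
        (fun st j =>
          if PySem.Int.mod (PySem.List.pyGetD l i 0) (PySem.List.pyGetD l j 0) = 0 then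
            let d' := PySem.List.pySetD st.2 i (PySem.List.pyGetD st.2 i 0 + 1)
            (st.1 + PySem.List.pyGetD d' j 0, d')
          else st)
        st)
    (0, List.replicate l.length (0 : Int))).1

-- ===== PORT B =====
def solution_alt (l : List Int) : Int :=
  (PySem.List.pyRange 0 (l.length : Int) 1).foldl
    (fun ans i =>
      (PySem.List.pyRange (i + 1) (l.length : Int) 1).foldl
        (fun ans j =>
          (PySem.List.pyRange (j + 1) (l.length : Int) 1).foldl
            (fun ans k =>
              if PySem.Int.mod (PySem.List.pyGetD l j 0) (PySem.List.pyGetD l i 0) = 0 then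
                if PySem.Int.mod (PySem.List.pyGetD l k 0) (PySem.List.pyGetD l j 0) = 0 then
                  ans + 1
                else ans
              else ans)
            ans)
        ans)
    0

-- ===== PRECONDITION & SPEC =====
-- Pre_ excludes exactly the inputs on which Python A raises ZeroDivisionError:
-- lists that contain a zero anywhere before the last element (A takes a modulus by every non-final element).
def Pre_solution (l : List Int) : Prop := ∀ x ∈ l.dropLast, x ≠ 0
instance (l : List Int) : Decidable (Pre_solution l) := by unfold Pre_solution; infer_instance
def pvWitness_solution : List Int := [1, 2, 4, 7]

def Spec_solution (l : List Int) (out : Int) : Prop := out = solution_alt l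
instance (l : List Int) (out : Int) : Decidable (Spec_solution l out) := by unfold Spec_solution; infer_instance

-- ===== CLAIM (what is proved, stated in full; the proofs are below) =====
def Claim_equal_solution : Prop := ∀ (l : List Int), Dom_solution l → Pre_solution l → Spec_solution l (solution l)
-- ===== LEMMAS AND PROOFS =====

-- indicator of "l[j] divides l[i]" (Python's l[i] % l[j] == 0), Nat indices
def pvI (l : List Int) (i j : Nat) : Int :=
  if PySem.Int.mod (l.getD i 0) (l.getD j 0) = 0 then 1 else 0

-- number of earlier divisors of l[i]  (the final value of A's divisors[i])
def pvd (l : List Int) (i : Nat) : Int := ∑ j ∈ Finset.range i, pvI l i j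

-- number of later multiples of l[j]
def pvc (l : List Int) (j : Nat) : Int := ∑ k ∈ Finset.Ico (j + 1) l.length, pvI l k j

theorem swapSum (n : ℕ) (f : ℕ → ℕ → ℤ) :
    ∑ i ∈ Finset.range n, ∑ j ∈ Finset.Ico (i + 1) n, f i j
      = ∑ j ∈ Finset.range n, ∑ i ∈ Finset.range j, f i j := by
  induction n with
  | zero => simp
  | succ n ih =>
      rw [Finset.sum_range_succ, Finset.sum_range_succ]
      simp only [Finset.Ico_self, Finset.sum_empty, add_zero]
      rw [Finset.sum_congr rfl (fun i hi => Finset.sum_Ico_succ_top (Finset.mem_range.mp hi) _),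
        Finset.sum_add_distrib, ih]


theorem sum_map_range (n : ℕ) (f : ℕ → ℤ) : ((List.range n).map f).sum = ∑ i ∈ Finset.range n, f i := rfl

theorem sum_map_pyRange (g : ℤ → ℤ) (a b : ℕ) :
    ((PySem.List.pyRange (a:ℤ) (b:ℤ) 1).map g).sum = ∑ k ∈ Finset.Ico a b, g ↑k := by
  rw [PySem.List.pyRange_one, List.map_map, Finset.sum_Ico_eq_sum_range]
  have hn : ((b:ℤ) - (a:ℤ)).toNat = b - a := by omega
  rw [hn, sum_map_range]
  exact Finset.sum_congr rfl fun k _ => by simp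

theorem innerA (l : List Int) (i : ℕ) (hi : i < l.length) (D : List Int)
    (hlen : D.length = l.length) (g : ℕ → ℤ) (hg : ∀ j < i, D.getD j 0 = g j)
    (a : ℤ) (m : ℕ) (hm : m ≤ i) :
    (PySem.List.pyRange 0 (m : ℤ) 1).foldl
      (fun (st : Int × List Int) j =>
        if PySem.Int.mod (PySem.List.pyGetD l (i:ℤ) 0) (PySem.List.pyGetD l j 0) = 0 then
          let d' := PySem.List.pySetD st.2 (i:ℤ) (PySem.List.pyGetD st.2 (i:ℤ) 0 + 1)
          (st.1 + PySem.List.pyGetD d' j 0, d')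
        else st)
      (a, D)
    = (a + ∑ j ∈ Finset.range m, pvI l i j * g j,
       D.set i (D.getD i 0 + ∑ j ∈ Finset.range m, pvI l i j)) := by
  induction m with
  | zero =>
      simp only [Nat.cast_zero, PySem.List.pyRange_one_eq_nil (le_refl 0), List.foldl_nil,
        Finset.range_zero, Finset.sum_empty, add_zero]
      rw [List.getD_eq_getElem D 0 (by omega), List.set_getElem_self]
  | succ m ih =>
      have hm' : m ≤ i := by omega
      have hsplit : PySem.List.pyRange 0 ((m+1 : ℕ) : ℤ) 1
          = PySem.List.pyRange 0 (m : ℤ) 1 ++ [(m : ℤ)] := by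
        have : ((m+1 : ℕ) : ℤ) = (m : ℤ) + 1 := by push_cast; ring
        rw [this, PySem.List.pyRange_one_succ_right (by omega)]
      rw [hsplit, List.foldl_append, ih hm']
      simp only [List.foldl_cons, List.foldl_nil]
      have hDi : (D.set i (D.getD i 0 + ∑ j ∈ Finset.range m, pvI l i j)).getD i 0
          = D.getD i 0 + ∑ j ∈ Finset.range m, pvI l i j := by
        simp [List.getD, hlen ▸ hi]
      have hDm : ∀ v : ℤ, (D.set i v).getD m 0 = g m := by
        intro v
        have : m ≠ i := by omega
        rw [show (D.set i v).getD m 0 = D.getD m 0 by simp [List.getD, this.symm]]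
        exact hg m (by omega)
      by_cases hc : PySem.Int.mod (PySem.List.pyGetD l (i:ℤ) 0) (PySem.List.pyGetD l (m:ℤ) 0) = 0
      · rw [if_pos hc]
        simp only [PySem.List.pySetD_natCast, PySem.List.pyGetD_natCast]
        have hpv : pvI l i m = 1 := by
          unfold pvI; rw [if_pos]; simpa using hc
        rw [hDi, List.set_set, Finset.sum_range_succ, Finset.sum_range_succ, hpv, hDm]
        simp only [Prod.mk.injEq]
        constructor
        · ring
        · congr 1; ring
      · rw [if_neg hc]
        have hpv : pvI l i m = 0 := by
          unfold pvI; rw [if_neg]; simpa using hc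
        rw [Finset.sum_range_succ, Finset.sum_range_succ, hpv]
        simp
def pvDM (l : List Int) (m : ℕ) : List Int :=
  (List.range l.length).map (fun t => if t < m then pvd l t else 0)

theorem pvDM_getD (l : List Int) (m t : ℕ) (ht : t < l.length) :
    (pvDM l m).getD t 0 = if t < m then pvd l t else 0 := by
  simp [pvDM, List.getD, ht]

theorem pvDM_zero (l : List Int) : pvDM l 0 = List.replicate l.length 0 := by
  rw [List.eq_replicate_iff]
  refine ⟨by simp [pvDM], fun b hb => ?_⟩
  simp only [pvDM, List.mem_map] at hb
  obtain ⟨t, _, rfl⟩ := hb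
  simp

theorem outerA (l : List Int) (m : ℕ) (hm : m ≤ l.length) :
    (PySem.List.pyRange 0 (m : ℤ) 1).foldl
      (fun (st : Int × List Int) i =>
        (PySem.List.pyRange 0 i 1).foldl
          (fun st j =>
            if PySem.Int.mod (PySem.List.pyGetD l i 0) (PySem.List.pyGetD l j 0) = 0 then
              let d' := PySem.List.pySetD st.2 i (PySem.List.pyGetD st.2 i 0 + 1)
              (st.1 + PySem.List.pyGetD d' j 0, d')
            else st)
          st)
      (0, pvDM l 0)
    = (∑ i ∈ Finset.range m, ∑ j ∈ Finset.range i, pvI l i j * pvd l j, pvDM l m) := by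
  induction m with
  | zero =>
      simp [PySem.List.pyRange_one_eq_nil (le_refl 0)]
  | succ m ih =>
      have hm' : m ≤ l.length := by omega
      have hsplit : PySem.List.pyRange 0 ((m+1 : ℕ) : ℤ) 1
          = PySem.List.pyRange 0 (m : ℤ) 1 ++ [(m : ℤ)] := by
        have : ((m+1 : ℕ) : ℤ) = (m : ℤ) + 1 := by push_cast; ring
        rw [this, PySem.List.pyRange_one_succ_right (by omega)]
      rw [hsplit, List.foldl_append, ih hm']
      simp only [List.foldl_cons, List.foldl_nil]
      rw [innerA l m (by omega) (pvDM l m) (by simp [pvDM]) (pvd l)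
        (fun j hj => by rw [pvDM_getD l m j (by omega), if_pos hj]) _ m (le_refl m)]
      rw [pvDM_getD l m m (by omega), if_neg (by omega)]
      simp only [Prod.mk.injEq]
      constructor
      · rw [Finset.sum_range_succ]
      · rw [zero_add]
        have hlen2 : ((pvDM l m).set m (∑ j ∈ Finset.range m, pvI l m j)).length
            = (pvDM l (m+1)).length := by simp [pvDM]
        apply List.ext_getElem hlen2
        intro t h1 h2
        have htl : t < l.length := by simpa [pvDM] using h2
        rw [List.getElem_set]
        by_cases htm : m = t
        · subst htm
          simp [pvDM, pvd]
        · simp only [if_neg htm, pvDM, List.getElem_map, List.getElem_range]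
          have : t < m ↔ t < m + 1 := by omega
          simp [this]

theorem solution_char (l : List Int) :
    solution l = ∑ i ∈ Finset.range l.length, ∑ j ∈ Finset.range i, pvI l i j * pvd l j := by
  unfold solution
  rw [← pvDM_zero, show ((l.length : ℤ)) = ((l.length : ℕ) : ℤ) from rfl,
    outerA l l.length (le_refl _)]

theorem solution_alt_char (l : List Int) :
    solution_alt l
      = ∑ i ∈ Finset.range l.length, ∑ j ∈ Finset.Ico (i + 1) l.length,
          ∑ k ∈ Finset.Ico (j + 1) l.length, pvI l j i * pvI l k j := by
  unfold solution_alt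
  have h3 : ∀ (i j : ℕ) (ans : ℤ),
      (PySem.List.pyRange ((j:ℤ) + 1) (l.length : Int) 1).foldl
        (fun ans k =>
          if PySem.Int.mod (PySem.List.pyGetD l (j:ℤ) 0) (PySem.List.pyGetD l (i:ℤ) 0) = 0 then
            if PySem.Int.mod (PySem.List.pyGetD l k 0) (PySem.List.pyGetD l (j:ℤ) 0) = 0 then
              ans + 1
            else ans
          else ans) ans
      = ans + ∑ k ∈ Finset.Ico (j + 1) l.length, pvI l j i * pvI l k j := by
    intro i j ans
    rw [PySem.List.foldl_congr_mem _ _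
        (fun ans k => ans + (if PySem.Int.mod (PySem.List.pyGetD l (j:ℤ) 0) (PySem.List.pyGetD l (i:ℤ) 0) = 0
            ∧ PySem.Int.mod (PySem.List.pyGetD l k 0) (PySem.List.pyGetD l (j:ℤ) 0) = 0 then 1 else 0)) _
        (by intro acc x _; split_ifs <;> simp_all)]
    rw [PySem.List.foldl_add]
    have : ((j:ℤ) + 1) = ((j + 1 : ℕ) : ℤ) := by push_cast; ring
    rw [this, sum_map_pyRange]
    congr 1
    refine Finset.sum_congr rfl fun k _ => ?_
    simp only [pvI, PySem.List.pyGetD_natCast]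
    split_ifs <;> simp_all [List.getD]
  have h2 : ∀ (i : ℕ) (ans : ℤ),
      (PySem.List.pyRange ((i:ℤ) + 1) (l.length : Int) 1).foldl
        (fun ans j =>
          (PySem.List.pyRange (j + 1) (l.length : Int) 1).foldl
            (fun ans k =>
              if PySem.Int.mod (PySem.List.pyGetD l j 0) (PySem.List.pyGetD l (i:ℤ) 0) = 0 then
                if PySem.Int.mod (PySem.List.pyGetD l k 0) (PySem.List.pyGetD l j 0) = 0 then
                  ans + 1
                else ans
              else ans) ans) ans
      = ans + ∑ j ∈ Finset.Ico (i + 1) l.length,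
          ∑ k ∈ Finset.Ico (j + 1) l.length, pvI l j i * pvI l k j := by
    intro i ans
    rw [PySem.List.foldl_congr_mem _ _
        (fun ans j => ans + ∑ k ∈ Finset.Ico (j.toNat + 1) l.length, pvI l j.toNat i * pvI l k j.toNat) _ ?_]
    · rw [PySem.List.foldl_add]
      have : ((i:ℤ) + 1) = ((i + 1 : ℕ) : ℤ) := by push_cast; ring
      rw [this, sum_map_pyRange]
      simp
    · intro acc x hx
      rw [PySem.List.mem_pyRange_one] at hx
      have hx0 : x = ((x.toNat : ℕ) : ℤ) := by omega
      rw [hx0]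
      exact h3 i x.toNat acc
  rw [PySem.List.foldl_congr_mem _ _
      (fun ans i => ans + ∑ j ∈ Finset.Ico (i.toNat + 1) l.length,
          ∑ k ∈ Finset.Ico (j + 1) l.length, pvI l j i.toNat * pvI l k j) _ ?_]
  · rw [PySem.List.foldl_add]
    have h0 : (0:ℤ) = ((0:ℕ):ℤ) := rfl
    rw [h0, sum_map_pyRange]
    simp
  · intro acc x hx
    rw [PySem.List.mem_pyRange_one] at hx
    have hx0 : x = ((x.toNat : ℕ) : ℤ) := by omega
    rw [hx0]
    exact h2 x.toNat acc

-- ===== VERDICT (by name: the statement is the Claim_ definition above) =====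
theorem solution_spec : Claim_equal_solution := by
  intro l _ _
  unfold Spec_solution
  rw [solution_char, solution_alt_char]
  have hB : ∀ i j : ℕ, ∑ k ∈ Finset.Ico (j + 1) l.length, pvI l j i * pvI l k j
      = pvI l j i * pvc l j := by
    intro i j; rw [pvc, Finset.mul_sum]
  have hA : ∑ i ∈ Finset.range l.length, ∑ j ∈ Finset.range i, pvI l i j * pvd l j
      = ∑ j ∈ Finset.range l.length, pvc l j * pvd l j := by
    rw [← swapSum l.length (fun j i => pvI l i j * pvd l j)]
    exact Finset.sum_congr rfl fun j _ => by rw [pvc, Finset.sum_mul]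
  have hB2 : ∑ i ∈ Finset.range l.length, ∑ j ∈ Finset.Ico (i + 1) l.length,
        ∑ k ∈ Finset.Ico (j + 1) l.length, pvI l j i * pvI l k j
      = ∑ j ∈ Finset.range l.length, pvd l j * pvc l j := by
    calc ∑ i ∈ Finset.range l.length, ∑ j ∈ Finset.Ico (i + 1) l.length,
          ∑ k ∈ Finset.Ico (j + 1) l.length, pvI l j i * pvI l k j
        = ∑ i ∈ Finset.range l.length, ∑ j ∈ Finset.Ico (i + 1) l.length, pvI l j i * pvc l j :=
          Finset.sum_congr rfl fun i _ => Finset.sum_congr rfl fun j _ => hB i j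
      _ = ∑ j ∈ Finset.range l.length, ∑ i ∈ Finset.range j, pvI l j i * pvc l j :=
          swapSum l.length _
      _ = ∑ j ∈ Finset.range l.length, pvd l j * pvc l j :=
          Finset.sum_congr rfl fun j _ => by rw [pvd, Finset.sum_mul]
  rw [hA, hB2]
  exact Finset.sum_congr rfl fun j _ => mul_comm _ _
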